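-- pv_equiv track=rewrite | github.com/migueldelafuente1/taurus_tools | tools/helpers.py | getValueCombinationsSorted
-- ===== SOURCE A (Python) =====
-- def getValueCombinationsSorted(data_lists, lev=0):
--     """
--     Get some lists of values sorted as tuples, returning a list of the combinations:
--     i.e: [ (4,5,1,3), (0,-1), (3,2,1)]
--     >>> [(1,-1,1), (1,-1,2), (1,-1,3), (1,0,1), (1,0,2), (1,0,3), (3,-1,1), ...]
--     """
--     assert len(data_lists) > 0, "use this with nonempty lists"
--     if len(data_lists) > 1:
--         aux = data_lists[0]
--         sort_2 = []
--         for i in aux: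
--             for j_vals in getValueCombinationsSorted(data_lists[1:], lev + 1):
--                 if isinstance(j_vals, list): # exception lev = 0 for > 2lists
--                     for js in j_vals: sort_2.append( (i, *js))
--                 else:
--                     sort_2.append( (i, *j_vals) )
--         if lev > 0: return [sort_2, ]
--         return sort_2
--     else:
--         return [(i, ) for i in sorted(data_lists[0])]
-- ===== SOURCE B (Python) =====
-- def getValueCombinationsSorted(data_lists, lev=0):
--     """Cartesian product of the lists as tuples, with the last list sorted."""
--     assert len(data_lists) > 0, "use this with nonempty lists"
--     lists = data_lists[:-1] + [sorted(data_lists[-1])]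
--     result = [()]
--     for lst in lists:
--         result = [combo + (x,) for combo in result for x in lst]
--     return result
-- ===== Notes on version B (the rewrite author's own statement) =====
-- stated objective: simpler
-- what changed: Replaces A's tail recursion with isinstance level-tracking and conditional wrapping by a single iterative product fold over the lists (last one pre-sorted), starting from a single empty combination.
-- outside the precondition, e.g. on getValueCombinationsSorted([[1], [2]], 1): A returns [((1, 2),)], B returns [(1, 2)]; on getValueCombinationsSorted([], 0): A raises AssertionError, B raises AssertionError
import Mathlib
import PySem

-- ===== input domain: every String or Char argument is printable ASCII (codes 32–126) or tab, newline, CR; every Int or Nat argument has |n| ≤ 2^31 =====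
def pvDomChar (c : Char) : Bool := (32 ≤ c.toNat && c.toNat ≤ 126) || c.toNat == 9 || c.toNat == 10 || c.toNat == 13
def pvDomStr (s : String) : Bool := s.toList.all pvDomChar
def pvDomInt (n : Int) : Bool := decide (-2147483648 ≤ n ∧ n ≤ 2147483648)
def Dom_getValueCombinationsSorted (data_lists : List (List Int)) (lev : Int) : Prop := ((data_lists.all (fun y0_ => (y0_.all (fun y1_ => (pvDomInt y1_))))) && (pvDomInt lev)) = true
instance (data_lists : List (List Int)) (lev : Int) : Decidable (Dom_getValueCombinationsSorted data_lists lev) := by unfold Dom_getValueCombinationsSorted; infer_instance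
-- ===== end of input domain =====

-- B replaces A's tail recursion + isinstance level-tracking with one iterative product fold
-- (last list pre-sorted); equivalence of RETURN values on Pre_ (nonempty input, no lev>0 wrapping).

-- ===== PORT A =====
-- Helper mirroring A's recursion. In Python the recursive call may return either a flat list of
-- tuples or (when lev > 0 and more than one list remains) that list wrapped in a singleton list;
-- we model the result as (flat list, wrapped? flag). The caller's `isinstance` branch iterates a
-- wrapped value by flattening it, which visits exactly the tuples of the flat list in the same
-- order as the unwrapped case, so both branches append `(i, *js)` for each tuple js of the flat
-- list in order — the port does exactly that, step for step.
def gvcsA : List (List Int) → Int → (List (List Int) × Bool)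
  | [], _ => ([], false)          -- unreachable: the assert excludes the empty input via Pre_
  | aux :: rest, lev =>
    if rest.length > 0 then       -- len(data_lists) > 1
      let sub := (gvcsA rest (lev + 1)).1
      let sort_2 := aux.foldl (fun acc i =>
        -- for j_vals …: isinstance-list ⇒ for js in j_vals: append (i,*js); else append (i,*j_vals)
        acc ++ sub.map (fun js => i :: js)) []
      if lev > 0 then (sort_2, true) else (sort_2, false)
    else
      ((PySem.List.sorted aux (fun x => x) false).map (fun i => [i]), false)

def getValueCombinationsSorted (data_lists : List (List Int)) (lev : Int) : List (List Int) :=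
  (gvcsA data_lists lev).1

-- ===== PORT B =====
def getValueCombinationsSorted_alt (data_lists : List (List Int)) (lev : Int) : List (List Int) :=
  -- lists = data_lists[:-1] + [sorted(data_lists[-1])]
  let lists := data_lists.dropLast ++ [PySem.List.sorted (data_lists.getLast?.getD []) (fun x => x) false]
  -- result = [()]; for lst in lists: result = [combo + (x,) for combo in result for x in lst]
  lists.foldl (fun result lst => result.flatMap (fun combo => lst.map (fun x => combo ++ [x]))) [[]]

-- ===== PRECONDITION & SPEC =====
-- Pre_ excludes (a) the empty list, where A's assert raises, and (b) len > 1 with lev > 0, where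
-- A returns [sort_2] — a value nested one level too deep, not of the declared list-of-tuples type.
def Pre_getValueCombinationsSorted (data_lists : List (List Int)) (lev : Int) : Prop :=
  data_lists ≠ [] ∧ (data_lists.length = 1 ∨ lev ≤ 0)
instance (data_lists : List (List Int)) (lev : Int) : Decidable (Pre_getValueCombinationsSorted data_lists lev) := by unfold Pre_getValueCombinationsSorted; infer_instance
def pvWitness_getValueCombinationsSorted : List (List Int) × Int := ([[3, 1], [0, -1]], 0)

def Spec_getValueCombinationsSorted (data_lists : List (List Int)) (lev : Int) (out : List (List Int)) : Prop := out = getValueCombinationsSorted_alt data_lists lev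
instance (data_lists : List (List Int)) (lev : Int) (out : List (List Int)) : Decidable (Spec_getValueCombinationsSorted data_lists lev out) := by unfold Spec_getValueCombinationsSorted; infer_instance

-- ===== CLAIM (what is proved, stated in full; the proofs are below) =====
def Claim_equal_getValueCombinationsSorted : Prop := ∀ (data_lists : List (List Int)) (lev : Int), Dom_getValueCombinationsSorted data_lists lev → Pre_getValueCombinationsSorted data_lists lev → Spec_getValueCombinationsSorted data_lists lev (getValueCombinationsSorted data_lists lev)

-- ===== LEMMAS AND PROOFS =====

-- B's fold step as a function
def pvStep (result : List (List Int)) (lst : List Int) : List (List Int) :=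
  result.flatMap (fun combo => lst.map (fun x => combo ++ [x]))

def pvProd (lists : List (List Int)) : List (List Int) := lists.foldl pvStep [[]]

-- the product fold distributes over its accumulator
theorem pvProd_foldl (L : List (List Int)) (r : List (List Int)) :
    L.foldl pvStep r = r.flatMap (fun c => (pvProd L).map (fun t => c ++ t)) := by
  induction L generalizing r with
  | nil =>
    show r = r.flatMap (fun c => [[]].map (fun t => c ++ t))
    simp
  | cons l L ih =>
    show L.foldl pvStep (pvStep r l) = _
    rw [ih (pvStep r l)]
    have hcons : pvProd (l :: L) = l.flatMap (fun x => (pvProd L).map (fun t => [x] ++ t)) := by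
      show L.foldl pvStep (pvStep [[]] l) = _
      rw [ih (pvStep [[]] l)]
      simp [pvStep, List.flatMap_map]
    rw [hcons]
    simp only [pvStep, List.flatMap_map, List.map_flatMap, List.map_map, Function.comp_def,
      List.append_assoc, List.flatMap_assoc, List.cons_append]

-- unfolding lemmas for gvcsA on the two reachable shapes
theorem gvcsA_single (aux : List Int) (_lev : Int) :
    (gvcsA [aux] _lev).1 = (PySem.List.sorted aux (fun x => x) false).map (fun i => [i]) := rfl

theorem gvcsA_cons_cons (aux b : List Int) (bs : List (List Int)) (lev : Int) :
    (gvcsA (aux :: b :: bs) lev).1 =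
      aux.foldl (fun acc i =>
        acc ++ ((gvcsA (b :: bs) (lev + 1)).1).map (fun js => i :: js)) [] := by
  show (if lev > 0
      then (aux.foldl (fun acc i =>
        acc ++ ((gvcsA (b :: bs) (lev + 1)).1).map (fun js => i :: js)) [], true)
      else (aux.foldl (fun acc i =>
        acc ++ ((gvcsA (b :: bs) (lev + 1)).1).map (fun js => i :: js)) [], false)).1 = _
  split_ifs <;> rfl

-- A's flat result is the product fold over (dropLast ++ [sorted last]), for every lev
theorem gvcsA_eq_prod (dl : List (List Int)) (lev : Int) (h : dl ≠ []) :
    (gvcsA dl lev).1 =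
      pvProd (dl.dropLast ++ [PySem.List.sorted (dl.getLast?.getD []) (fun x => x) false]) := by
  induction dl generalizing lev with
  | nil => exact absurd rfl h
  | cons aux rest ih =>
    cases rest with
    | nil =>
      rw [gvcsA_single]
      show _ = List.foldl pvStep (pvStep [[]] _) []
      simp [pvStep]
    | cons b bs =>
      rw [gvcsA_cons_cons,
        PySem.List.foldl_append_eq_flatMap
          (fun i => ((gvcsA (b :: bs) (lev + 1)).1).map (fun js => i :: js)) aux [],
        ih (lev + 1) (by simp)]
      have hdrop : (aux :: b :: bs).dropLast = aux :: (b :: bs).dropLast := by simp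
      have hlast : (aux :: b :: bs).getLast?.getD [] = (b :: bs).getLast?.getD [] := by
        simp [List.getLast?_cons_cons]
      rw [hdrop, hlast, List.cons_append]
      show _ = List.foldl pvStep (pvStep [[]] aux) _
      rw [pvProd_foldl]
      simp [pvStep, List.flatMap_map]

-- ===== VERDICT (by name: the statement is the Claim_ definition above) =====
theorem getValueCombinationsSorted_spec : Claim_equal_getValueCombinationsSorted := by
  intro dl lev _ hpre
  unfold Spec_getValueCombinationsSorted getValueCombinationsSorted getValueCombinationsSorted_alt
  rw [gvcsA_eq_prod dl lev hpre.1]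
  show pvProd _ = (dl.dropLast ++ [PySem.List.sorted (dl.getLast?.getD []) (fun x => x) false]).foldl pvStep [[]]
  rfl
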